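-- pv_equiv track=rewrite | github.com/tezheng/ModelInsider | modelexport/core/hierarchy_utils.py | count_direct_and_total_nodes
-- ===== SOURCE A (Python) =====
-- def count_direct_and_total_nodes(tagged_nodes: dict[str, str]) -> tuple[dict[str, int], dict[str, int]]:
--     """
--     Count direct nodes (not in children) and total nodes (including children) per hierarchy tag.
--
--     Args:
--         tagged_nodes: Dictionary mapping node names to hierarchy tags
--
--     Returns:
--         Tuple of (direct_counts, total_counts) dictionaries
--     """
--     from collections import defaultdict
--
--     direct_counts = defaultdict(int)
--     total_counts = defaultdict(int)
--
--     # First pass: count direct nodes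
--     for _node_name, tag in tagged_nodes.items():
--         if tag:
--             direct_counts[tag] += 1
--
--     # Second pass: accumulate total counts (direct + children)
--     for _node_name, tag in tagged_nodes.items():
--         # Count for all parent paths
--         parts = tag.split("/")
--         for i in range(1, len(parts) + 1):
--             prefix = "/".join(parts[:i])
--             if prefix:
--                 total_counts[prefix] += 1
--
--     return dict(direct_counts), dict(total_counts)
-- ===== SOURCE B (Python) =====
-- def count_direct_and_total_nodes(tagged_nodes: dict[str, str]) -> tuple[dict[str, int], dict[str, int]]:
--     """Single-pass character-scan re-implementation: never splits or re-joins.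
--     Every '/'-separated prefix of a tag is exactly tag[:i] for each position i
--     holding a '/', plus the tag itself; one scan per node bumps both dicts."""
--     direct_counts = {}
--     total_counts = {}
--     for tag in tagged_nodes.values():
--         if tag:
--             direct_counts[tag] = direct_counts.get(tag, 0) + 1
--         for i, ch in enumerate(tag):
--             if ch == "/":
--                 prefix = tag[:i]
--                 if prefix:
--                     total_counts[prefix] = total_counts.get(prefix, 0) + 1
--         if tag:
--             total_counts[tag] = total_counts.get(tag, 0) + 1
--     return direct_counts, total_counts
-- ===== Notes on version B (the rewrite author's own statement) =====
-- stated objective: faster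
-- what changed: B replaces A's two passes that split each tag and rebuild every prefix with '/'.join over a range loop by a single fused pass that scans each tag's characters once, emitting each '/'-prefix as the slice tag[:i] at every '/' position (plus the whole tag) and updating both dicts on the fly.
import Mathlib
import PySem

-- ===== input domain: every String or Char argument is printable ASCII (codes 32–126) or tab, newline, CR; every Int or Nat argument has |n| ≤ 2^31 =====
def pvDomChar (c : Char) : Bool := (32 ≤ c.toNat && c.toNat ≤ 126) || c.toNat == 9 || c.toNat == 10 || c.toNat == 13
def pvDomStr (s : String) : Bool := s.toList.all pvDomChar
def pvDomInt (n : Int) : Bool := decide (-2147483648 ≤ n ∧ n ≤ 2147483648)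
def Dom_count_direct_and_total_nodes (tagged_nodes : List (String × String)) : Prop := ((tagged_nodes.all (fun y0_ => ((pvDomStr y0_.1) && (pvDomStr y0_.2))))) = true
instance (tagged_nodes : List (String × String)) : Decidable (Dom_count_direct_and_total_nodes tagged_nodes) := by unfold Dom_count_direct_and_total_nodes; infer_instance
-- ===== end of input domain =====

-- B replaces A's two passes (split each tag, rebuild every "/"-prefix with a join over a
-- range loop) by ONE fused pass that scans each tag's characters once: every "/"-prefix
-- is the slice tag[:i] at a '/' position, plus the whole tag (objective: faster; same value).

-- ===== PORT A =====
-- tag.split("/"): the separator is the non-empty literal "/", exactly PySem.Chars.splitOn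
def pySplitSlash (t : String) : List String := (PySem.Chars.splitOn t.toList ['/']).map String.ofList

def count_direct_and_total_nodes (tagged_nodes : List (String × String)) : (List (String × Int)) × (List (String × Int)) :=
  let d : PySem.Dict String String := PySem.Dict.ofList tagged_nodes
  let direct_counts : PySem.Dict String Int :=
    d.items.foldl (fun dc kv => if kv.2 ≠ "" then dc.modify kv.2 0 (· + 1) else dc)
      PySem.Dict.empty
  let total_counts : PySem.Dict String Int :=
    d.items.foldl (fun tc kv =>
      let parts := pySplitSlash kv.2
      (PySem.List.pyRange 1 (PySem.List.len parts + 1) 1).foldl (fun tc i =>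
        let pref := PySem.Str.join "/" (PySem.List.slice parts none (some i))
        if pref ≠ "" then tc.modify pref 0 (· + 1) else tc) tc)
      PySem.Dict.empty
  (direct_counts.items, total_counts.items)

-- ===== PORT B =====
def count_direct_and_total_nodes_alt (tagged_nodes : List (String × String)) : (List (String × Int)) × (List (String × Int)) :=
  let st := (PySem.Dict.ofList tagged_nodes : PySem.Dict String String).values.foldl
    (fun (st : PySem.Dict String Int × PySem.Dict String Int) tag =>
      let direct := if tag ≠ "" then st.1.insert tag (st.1.getD tag 0 + 1) else st.1
      let total := (PySem.List.enumerate tag.toList).foldl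
        (fun tc ic =>
          if ic.2 = '/' then
            let pref := PySem.Str.slice tag none (some ic.1)
            if pref ≠ "" then tc.insert pref (tc.getD pref 0 + 1) else tc
          else tc) st.2
      let total := if tag ≠ "" then total.insert tag (total.getD tag 0 + 1) else total
      (direct, total))
    (PySem.Dict.empty, PySem.Dict.empty)
  (st.1.items, st.2.items)

-- ===== PRECONDITION & SPEC =====
def Spec_count_direct_and_total_nodes (tagged_nodes : List (String × String)) (out : (List (String × Int)) × (List (String × Int))) : Prop := out = count_direct_and_total_nodes_alt tagged_nodes
instance (tagged_nodes : List (String × String)) (out : (List (String × Int)) × (List (String × Int))) : Decidable (Spec_count_direct_and_total_nodes tagged_nodes out) := by unfold Spec_count_direct_and_total_nodes; infer_instance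

-- ===== CLAIM (what is proved, stated in full; the proofs are below) =====
def Claim_equal_count_direct_and_total_nodes : Prop := ∀ (tagged_nodes : List (String × String)), Dom_count_direct_and_total_nodes tagged_nodes → Spec_count_direct_and_total_nodes tagged_nodes (count_direct_and_total_nodes tagged_nodes)

-- ===== LEMMAS AND PROOFS =====

def mySplit : List Char → List (List Char)
  | [] => [[]]
  | c :: r =>
      if c = '/' then [] :: mySplit r
      else
        match mySplit r with
        | [] => [[c]]
        | p :: ps => (c :: p) :: ps

lemma mySplit_ne_nil (s : List Char) : mySplit s ≠ [] := by
  cases s with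
  | nil => simp [mySplit]
  | cons c r =>
    simp only [mySplit]
    split_ifs
    · simp
    · cases h : mySplit r <;> simp

lemma go_eq (fuel : Nat) : ∀ (l cur : List Char) (acc : List (List Char)), l.length < fuel →
    PySem.Chars.splitOn.go ['/'] fuel l cur acc
      = acc.reverse ++ (cur.reverse ++ (mySplit l).headI) :: (mySplit l).tail := by
  induction fuel with
  | zero => intro l cur acc h; omega
  | succ f ih =>
    intro l cur acc h
    cases l with
    | nil =>
      rw [PySem.Chars.splitOn.go.eq_def]
      simp [mySplit]
    | cons c rest =>
      rw [PySem.Chars.splitOn.go.eq_def]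
      simp only []
      by_cases hc : c = '/'
      · subst hc
        have hpre : List.isPrefixOf ['/'] ('/' :: rest) = true := by simp [List.isPrefixOf]
        simp only [hpre, if_pos]
        have hd : List.drop (['/'].length) ('/' :: rest) = rest := rfl
        rw [hd, ih rest [] ((cur.reverse :: acc)) (by simpa using Nat.lt_of_succ_lt_succ h)]
        simp only [mySplit, if_pos]
        cases hm : mySplit rest with
        | nil => exact absurd hm (mySplit_ne_nil rest)
        | cons p ps => simp
      · have hpre : List.isPrefixOf ['/'] (c :: rest) = false := by
          simp [List.isPrefixOf]; exact fun hh => hc hh.symm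
        simp only [hpre, Bool.false_eq_true, if_neg, not_false_iff]
        rw [ih rest (c :: cur) acc (by simpa using Nat.lt_of_succ_lt_succ h)]
        simp only [mySplit, hc, if_neg, not_false_iff]
        cases hm : mySplit rest with
        | nil => exact absurd hm (mySplit_ne_nil rest)
        | cons p ps => simp

lemma splitOn_eq (s : List Char) : PySem.Chars.splitOn s ['/'] = mySplit s := by
  show PySem.Chars.splitOn.go ['/'] (s.length + 1) s [] [] = _
  rw [go_eq (s.length + 1) s [] [] (by omega)]
  cases hm : mySplit s with
  | nil => exact absurd hm (mySplit_ne_nil s)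
  | cons p ps => simp

def joinPrefs : List (List Char) → List (List Char)
  | [] => []
  | p :: ps => p :: (joinPrefs ps).map (fun q => p ++ '/' :: q)

def slashPrefs : List Char → List (List Char)
  | [] => []
  | c :: r => (if c = '/' then [[]] else []) ++ (slashPrefs r).map (c :: ·)

lemma joinPrefs_eq (ps : List (List Char)) :
    (List.range ps.length).map (fun k => PySem.Chars.join ['/'] (ps.take (k + 1))) = joinPrefs ps := by
  induction ps with
  | nil => rfl
  | cons p ps ih =>
    rw [List.length_cons, List.range_succ_eq_map, List.map_cons, List.map_map]
    simp only [List.take_succ_cons, List.take_zero, PySem.Chars.join_singleton, joinPrefs]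
    congr 1
    rw [← ih, List.map_map]
    apply List.map_congr_left
    intro k hk
    have hk' : k < ps.length := List.mem_range.mp hk
    simp only [Function.comp]
    have hne : ps.take (k + 1) ≠ [] := by
      cases ps with
      | nil => simp at hk'
      | cons q qs => simp
    cases hq : ps.take (k + 1) with
    | nil => exact absurd hq hne
    | cons q qs =>
      rw [PySem.Chars.join_cons_cons]
      simp

lemma joinPrefs_mySplit (s : List Char) : joinPrefs (mySplit s) = slashPrefs s ++ [s] := by
  induction s with
  | nil => rfl
  | cons c r ih =>
    by_cases hc : c = '/'
    · subst hc
      simp only [mySplit, if_pos, joinPrefs, slashPrefs]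
      rw [ih]
      simp
    · simp only [mySplit, hc, if_neg, not_false_iff, slashPrefs]
      cases hm : mySplit r with
      | nil => exact absurd hm (mySplit_ne_nil r)
      | cons p ps =>
        have hj : joinPrefs ((c :: p) :: ps) = (joinPrefs (p :: ps)).map (c :: ·) := by
          simp only [joinPrefs, List.map_cons, List.map_map]
          rfl
        rw [hj, ← hm, ih]
        simp

lemma enum_slash (u : List Char) : ∀ (v : List Char),
    (PySem.List.enumerate u (v.length : Int)).filterMap
        (fun ic => if ic.2 = '/' then some (PySem.List.slice (v ++ u) none (some ic.1)) else none)
      = (slashPrefs u).map (v ++ ·) := by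
  induction u with
  | nil => intro v; rfl
  | cons c r ih =>
    intro v
    rw [PySem.List.enumerate_cons, List.filterMap_cons]
    have hs : PySem.List.slice (v ++ c :: r) none (some (v.length : Int)) = v := by
      rw [PySem.List.slice_to_natCast]
      exact List.take_left
    have hcast : ((v.length : Int) + 1) = ((v ++ [c]).length : Int) := by
      simp
    have happ : v ++ c :: r = (v ++ [c]) ++ r := by simp
    by_cases hc : c = '/'
    · subst hc
      simp only [if_pos, hs]
      rw [hcast, happ, ih (v ++ ['/'])]
      simp only [slashPrefs, if_pos, List.map_map, List.map_cons, List.append_nil,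
        List.cons_append, List.nil_append]
      congr 1
      apply List.map_congr_left
      intro q _
      simp
    · simp only [hc, if_neg, not_false_iff]
      rw [hcast, happ, ih (v ++ [c])]
      simp only [slashPrefs, hc, if_neg, not_false_iff, List.nil_append, List.map_map]
      apply List.map_congr_left
      intro q _
      simp



def pvPrefsA (t : String) : List String :=
  ((PySem.List.pyRange 1 (PySem.List.len (pySplitSlash t) + 1) 1).map
    (fun i => PySem.Str.join "/" (PySem.List.slice (pySplitSlash t) none (some i)))).filter
    (fun p => p ≠ "")

def pvPrefsB (t : String) : List String :=
  (((PySem.List.enumerate t.toList).filterMap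
      (fun ic => if ic.2 = '/' then some (PySem.Str.slice t none (some ic.1)) else none)).filter
    (fun p => p ≠ "")) ++ (if t ≠ "" then [t] else [])

lemma unfiltA_eq (t : String) :
    (PySem.List.pyRange 1 (PySem.List.len (pySplitSlash t) + 1) 1).map
      (fun i => PySem.Str.join "/" (PySem.List.slice (pySplitSlash t) none (some i)))
    = (slashPrefs t.toList).map String.ofList ++ [t] := by
  have hM : pySplitSlash t = (mySplit t.toList).map String.ofList := by
    rw [pySplitSlash, splitOn_eq]
  have hlen : PySem.List.len (pySplitSlash t) = ((mySplit t.toList).length : Int) := by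
    simp [PySem.List.len, hM]
  rw [hlen, PySem.List.pyRange_one, List.map_map]
  have htoNat : (((mySplit t.toList).length : Int) + 1 - 1).toNat = (mySplit t.toList).length := by
    omega
  rw [htoNat]
  have hstep : ∀ k ∈ List.range (mySplit t.toList).length,
      ((fun i => PySem.Str.join "/" (PySem.List.slice (pySplitSlash t) none (some i))) ∘
        (fun k : Nat => (1 : Int) + ↑k)) k
      = String.ofList (PySem.Chars.join ['/'] ((mySplit t.toList).take (k + 1))) := by
    intro k _
    simp only [Function.comp]
    have hci : ((1 : Int) + ↑k) = ((k + 1 : Nat) : Int) := by push_cast; ring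
    rw [hci, PySem.List.slice_to_natCast, hM, ← List.map_take]
    simp only [PySem.Str.join, List.map_map]
    rw [show (String.toList ∘ String.ofList) = (id : List Char → List Char) from
      funext (fun l => String.toList_ofList), List.map_id]
    rw [show "/".toList = ['/'] from by decide]
  rw [List.map_congr_left hstep]
  have hmm : List.map (fun a => String.ofList (PySem.Chars.join ['/'] ((mySplit t.toList).take (a + 1))))
        (List.range (mySplit t.toList).length)
      = List.map String.ofList (joinPrefs (mySplit t.toList)) := by
    rw [← joinPrefs_eq, List.map_map]
    rfl
  rw [hmm, joinPrefs_mySplit, List.map_append]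
  simp [String.ofList_toList]

lemma unfiltB_eq (t : String) :
    (PySem.List.enumerate t.toList).filterMap
      (fun ic => if ic.2 = '/' then some (PySem.Str.slice t none (some ic.1)) else none)
    = (slashPrefs t.toList).map String.ofList := by
  have hfn : (fun ic : Int × Char => if ic.2 = '/' then some (PySem.Str.slice t none (some ic.1)) else none)
      = (fun ic : Int × Char => Option.map String.ofList
          (if ic.2 = '/' then some (PySem.List.slice t.toList none (some ic.1)) else none)) := by
    funext ic
    by_cases h : ic.2 = '/' <;> simp [h, PySem.Str.slice]
  rw [hfn, ← List.map_filterMap]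
  have h := enum_slash t.toList []
  simp only [List.nil_append, List.length_nil, Nat.cast_zero] at h
  rw [h]
  simp

lemma prefs_eq (t : String) : pvPrefsA t = pvPrefsB t := by
  rw [pvPrefsA, pvPrefsB, unfiltA_eq, ← unfiltB_eq, List.filter_append]
  congr 1
  by_cases h : t = "" <;> simp [h]

def pvBump (d : PySem.Dict String Int) (p : String) : PySem.Dict String Int := d.modify p 0 (· + 1)

lemma innerA (t : String) (tc : PySem.Dict String Int) :
    (PySem.List.pyRange 1 (PySem.List.len (pySplitSlash t) + 1) 1).foldl (fun tc i =>
        let pref := PySem.Str.join "/" (PySem.List.slice (pySplitSlash t) none (some i))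
        if pref ≠ "" then tc.modify pref 0 (· + 1) else tc) tc
      = (pvPrefsA t).foldl pvBump tc := by
  simp only [pvPrefsA, List.foldl_filter, List.foldl_map, pvBump, decide_eq_true_eq]

def pvDStep (d : PySem.Dict String Int) (tag : String) : PySem.Dict String Int :=
  if tag ≠ "" then d.insert tag (d.getD tag 0 + 1) else d

def pvTStep (tc : PySem.Dict String Int) (tag : String) : PySem.Dict String Int :=
  let total := (PySem.List.enumerate tag.toList).foldl
    (fun tc ic =>
      if ic.2 = '/' then
        let pref := PySem.Str.slice tag none (some ic.1)
        if pref ≠ "" then tc.insert pref (tc.getD pref 0 + 1) else tc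
      else tc) tc
  if tag ≠ "" then total.insert tag (total.getD tag 0 + 1) else total

lemma innerB (t : String) (tc : PySem.Dict String Int) :
    pvTStep tc t = (pvPrefsB t).foldl pvBump tc := by
  have hhead : ∀ (x : PySem.Dict String Int),
      (((PySem.List.enumerate t.toList).filterMap
        (fun ic => if ic.2 = '/' then some (PySem.Str.slice t none (some ic.1)) else none)).filter
          (fun p => p ≠ "")).foldl pvBump x
      = (PySem.List.enumerate t.toList).foldl (fun tc ic =>
          if ic.2 = '/' then
            let pref := PySem.Str.slice t none (some ic.1)
            if pref ≠ "" then tc.insert pref (tc.getD pref 0 + 1) else tc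
          else tc) x := by
    intro x
    rw [List.filter_filterMap, List.foldl_filterMap]
    apply PySem.List.foldl_congr_mem
    intro tc ic _
    by_cases h : ic.2 = '/'
    · by_cases hp : PySem.Str.slice t none (some ic.1) = ""
      · simp [h, hp, Option.filter]
      · simp [h, hp, Option.filter, pvBump, PySem.Dict.modify]
    · simp [h, Option.filter]
  rw [pvTStep, pvPrefsB, List.foldl_append, hhead]
  by_cases ht : t = ""
  · simp [ht]
  · simp [ht, pvBump, PySem.Dict.modify]

theorem ports_eq (tn : List (String × String)) :
    count_direct_and_total_nodes tn = count_direct_and_total_nodes_alt tn := by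
  simp only [count_direct_and_total_nodes, count_direct_and_total_nodes_alt]
  have hstep : (fun (st : PySem.Dict String Int × PySem.Dict String Int) (tag : String) =>
      (if tag ≠ "" then st.1.insert tag (st.1.getD tag 0 + 1) else st.1,
        if tag ≠ "" then
          ((PySem.List.enumerate tag.toList).foldl (fun tc ic =>
            if ic.2 = '/' then
              if PySem.Str.slice tag none (some ic.1) ≠ "" then
                tc.insert (PySem.Str.slice tag none (some ic.1))
                  (tc.getD (PySem.Str.slice tag none (some ic.1)) 0 + 1)
              else tc
            else tc) st.2).insert tag
            (((PySem.List.enumerate tag.toList).foldl (fun tc ic =>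
            if ic.2 = '/' then
              if PySem.Str.slice tag none (some ic.1) ≠ "" then
                tc.insert (PySem.Str.slice tag none (some ic.1))
                  (tc.getD (PySem.Str.slice tag none (some ic.1)) 0 + 1)
              else tc
            else tc) st.2).getD tag 0 + 1)
        else (PySem.List.enumerate tag.toList).foldl (fun tc ic =>
            if ic.2 = '/' then
              if PySem.Str.slice tag none (some ic.1) ≠ "" then
                tc.insert (PySem.Str.slice tag none (some ic.1))
                  (tc.getD (PySem.Str.slice tag none (some ic.1)) 0 + 1)
              else tc
            else tc) st.2))
      = (fun st tag => (pvDStep st.1 tag, pvTStep st.2 tag)) := rfl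
  rw [hstep, PySem.List.foldl_prod_mk]
  simp only [PySem.Dict.values]
  rw [List.foldl_map, List.foldl_map]
  refine Prod.ext ?_ ?_
  · rfl
  · show (((PySem.Dict.ofList tn : PySem.Dict String String).items.foldl _ PySem.Dict.empty :
      PySem.Dict String Int)).items = _
    congr 1
    apply PySem.List.foldl_congr_mem
    intro tc kv _
    show (PySem.List.pyRange 1 (PySem.List.len (pySplitSlash kv.2) + 1) 1).foldl _ tc = _
    rw [innerA, prefs_eq, ← innerB]

-- ===== VERDICT (by name: the statement is the Claim_ definition above) =====
theorem count_direct_and_total_nodes_spec : Claim_equal_count_direct_and_total_nodes := by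
  intro tagged_nodes _
  exact ports_eq tagged_nodes
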